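-- pv_equiv track=rewrite | github.com/Scaleup-Excellenteam/google-team4 | auto_complete/src/backend/search.py | _one_missing_in_query
-- ===== SOURCE A (Python) =====
-- from typing import Optional, List
--
-- def _one_missing_in_query(q: str, t: str) -> Optional[int]:
--     """Returns the 1-based position in query where a letter is missing, or None if not exactly one."""
--     assert len(q) + 1 == len(t)
--     i = j = 0
--     gap_pos: Optional[int] = None
--     while i < len(q) and j < len(t):
--         if q[i] == t[j]:
--             i += 1
--             j += 1
--         else:
--             if gap_pos is not None:
--                 return None
--             gap_pos = i + 1
--             j += 1
--     if gap_pos is None: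
--         gap_pos = len(q) + 1
--     return gap_pos
-- ===== SOURCE B (Python) =====
-- from typing import Optional
--
-- def _one_missing_in_query(q: str, t: str) -> Optional[int]:
--     """Returns the 1-based position in query where a letter is missing, or None if not exactly one."""
--     assert len(q) + 1 == len(t)
--     i = next((k for k in range(len(q)) if q[k] != t[k]), None)
--     if i is None:
--         return len(q) + 1
--     return i + 1 if q[i:] == t[i + 1:] else None
-- ===== Notes on version B (the rewrite author's own statement) =====
-- stated objective: simpler
-- what changed: Replaces the interleaved two-pointer walk with gap state by a prefix scan for the first mismatch followed by one slice equality check of the remaining suffix.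
import Mathlib
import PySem

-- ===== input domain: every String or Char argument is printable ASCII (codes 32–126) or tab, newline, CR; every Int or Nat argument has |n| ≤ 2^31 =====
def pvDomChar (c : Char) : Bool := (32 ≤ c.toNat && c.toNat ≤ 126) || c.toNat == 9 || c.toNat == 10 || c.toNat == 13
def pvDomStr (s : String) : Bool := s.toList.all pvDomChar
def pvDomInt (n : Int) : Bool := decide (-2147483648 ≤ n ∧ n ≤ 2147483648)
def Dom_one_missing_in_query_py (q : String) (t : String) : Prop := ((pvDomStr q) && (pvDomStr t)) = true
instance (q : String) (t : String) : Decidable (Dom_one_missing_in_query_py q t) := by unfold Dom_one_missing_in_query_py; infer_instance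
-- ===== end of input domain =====

-- B replaces A's interleaved two-pointer walk with gap state by a first-mismatch scan
-- plus one suffix (slice) equality check; same cost, simpler decomposition.
-- Pre_ excludes inputs violating A's assert len(q)+1 == len(t) (AssertionError).

-- ===== PORT A =====
-- two-pointer loop of A: state (qs, ts, i, gap); j is implicit in ts's position
def pvAuxA (qlen : Int) : List Char → List Char → Int → Option Int → Option Int
  | qc::qr, tc::tr, i, gap =>
    if qc = tc then pvAuxA qlen qr tr (i+1) gap
    else match gap with
      | some _ => none
      | none => pvAuxA qlen (qc::qr) tr i (some (i+1))
  | _, _, _, gap => match gap with | some g => some g | none => some (qlen + 1)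
  termination_by _ ts _ _ => ts.length

def one_missing_in_query_py (q : String) (t : String) : Option Int :=
  pvAuxA (q.toList.length : Int) q.toList t.toList 0 none

-- ===== PORT B =====
-- first index where the two strings disagree (scanning common positions), if any
def pvFirstMM : List Char → List Char → Option Nat
  | qc::qr, tc::tr => if qc = tc then (pvFirstMM qr tr).map (· + 1) else some 0
  | _, _ => none

def one_missing_in_query_py_alt (q : String) (t : String) : Option Int :=
  let qs := q.toList
  let ts := t.toList
  match pvFirstMM qs ts with
  | none => some ((qs.length : Int) + 1)
  | some i => if qs.drop i = ts.drop (i+1) then some ((i : Int) + 1) else none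

-- ===== PRECONDITION & SPEC =====
-- exactly A's assert: len(q) + 1 == len(t); elsewhere A raises AssertionError
def Pre_one_missing_in_query_py (q : String) (t : String) : Prop :=
  q.toList.length + 1 = t.toList.length
instance (q : String) (t : String) : Decidable (Pre_one_missing_in_query_py q t) := by
  unfold Pre_one_missing_in_query_py; infer_instance

def pvWitness_one_missing_in_query_py : String × String := ("abc", "abxc")

def Spec_one_missing_in_query_py (q : String) (t : String) (out : Option Int) : Prop := out = one_missing_in_query_py_alt q t
instance (q : String) (t : String) (out : Option Int) : Decidable (Spec_one_missing_in_query_py q t out) := by unfold Spec_one_missing_in_query_py; infer_instance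

-- ===== CLAIM (what is proved, stated in full; the proofs are below) =====
def Claim_equal_one_missing_in_query_py : Prop := ∀ (q : String) (t : String), Dom_one_missing_in_query_py q t → Pre_one_missing_in_query_py q t → Spec_one_missing_in_query_py q t (one_missing_in_query_py q t)

-- ===== LEMMAS AND PROOFS =====

-- elementwise agreement on common positions (until either list ends)
def pvAgree : List Char → List Char → Bool
  | a::as', b::bs' => a == b && pvAgree as' bs'
  | _, _ => true

theorem pvAuxA_some (qlen : Int) : ∀ (qs ts : List Char) (i g : Int),
    pvAuxA qlen qs ts i (some g) = if pvAgree qs ts then some g else none := by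
  intro qs
  induction qs with
  | nil => intro ts i g; cases ts <;> simp [pvAuxA, pvAgree]
  | cons qc qr ih =>
    intro ts i g
    cases ts with
    | nil => simp [pvAuxA, pvAgree]
    | cons tc tr =>
      by_cases h : qc = tc <;> simp [pvAuxA, pvAgree, h, ih]

theorem pvAgree_eq_of_len : ∀ (as' bs' : List Char), as'.length = bs'.length →
    (pvAgree as' bs' = true ↔ as' = bs') := by
  intro as'
  induction as' with
  | nil => intro bs' h; cases bs' <;> simp_all [pvAgree]
  | cons a at' ih =>
    intro bs' h
    cases bs' with
    | nil => simp at h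
    | cons b bt =>
      simp only [List.length_cons, Nat.add_right_cancel_iff] at h
      simp [pvAgree, ih bt h]

theorem pvFirstMM_lt : ∀ (qs ts : List Char) (k : Nat), pvFirstMM qs ts = some k →
    k < qs.length ∧ k < ts.length := by
  intro qs
  induction qs with
  | nil => intro ts k h; cases ts <;> simp [pvFirstMM] at h
  | cons qc qr ih =>
    intro ts k h
    cases ts with
    | nil => simp [pvFirstMM] at h
    | cons tc tr =>
      by_cases hc : qc = tc
      · simp [pvFirstMM, hc, Option.map_eq_some_iff] at h
        obtain ⟨k', hk', rfl⟩ := h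
        have := ih tr k' hk'
        simp; omega
      · simp [pvFirstMM, hc] at h
        simp [← h]

theorem pvAuxA_none (qlen : Int) : ∀ (qs ts : List Char) (i : Int),
    pvAuxA qlen qs ts i none =
      match pvFirstMM qs ts with
      | none => some (qlen + 1)
      | some k => if pvAgree (qs.drop k) (ts.drop (k+1)) then some (i + (k : Int) + 1) else none := by
  intro qs
  induction qs with
  | nil => intro ts i; cases ts <;> simp [pvAuxA, pvFirstMM]
  | cons qc qr ih =>
    intro ts i
    cases ts with
    | nil => simp [pvAuxA, pvFirstMM]
    | cons tc tr =>
      by_cases h : qc = tc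
      · rw [pvAuxA, if_pos h, ih tr (i+1)]
        simp only [pvFirstMM, if_pos h]
        cases hm : pvFirstMM qr tr with
        | none => simp
        | some k' =>
          simp only [Option.map_some]
          have : i + 1 + (k' : Int) + 1 = i + ((k' : Nat) + 1 : Nat) + 1 := by push_cast; ring
          simp [List.drop_succ_cons, this]
      · rw [pvAuxA, if_neg h]
        simp only [pvFirstMM, if_neg h, pvAuxA_some]
        simp

theorem one_missing_in_query_py_spec : Claim_equal_one_missing_in_query_py := by
  intro q t _ hpre
  unfold Pre_one_missing_in_query_py at hpre
  unfold Spec_one_missing_in_query_py one_missing_in_query_py one_missing_in_query_py_alt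
  rw [pvAuxA_none]
  cases hm : pvFirstMM q.toList t.toList with
  | none => simp [hm]
  | some k =>
    have hk := pvFirstMM_lt _ _ _ hm
    have hlen : (q.toList.drop k).length = (t.toList.drop (k+1)).length := by
      simp only [List.length_drop]; omega
    simp only [hm]
    rw [show (0 : Int) + (k : Int) + 1 = (k : Int) + 1 by ring]
    by_cases hag : pvAgree (q.toList.drop k) (t.toList.drop (k+1)) = true
    · rw [if_pos hag, if_pos ((pvAgree_eq_of_len _ _ hlen).mp hag)]
    · rw [if_neg hag, if_neg (fun he => hag ((pvAgree_eq_of_len _ _ hlen).mpr he))]
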